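-- pv_equiv track=rewrite | github.com/0lesya/Laboratory | OTIK_labs/ archiver/shannon/Encoder.py | __create_probabilities_dict
-- ===== SOURCE A (Python) =====
-- from operator import itemgetter
--
-- def __create_probabilities_dict(information):
--     d = {}
--     for s in information:
--         if d.__contains__(s) == False:
--             d[s] = 1
--         else:
--             d[s] += 1
--     return dict(sorted(d.items(), reverse=True, key=itemgetter(1)))
-- ===== SOURCE B (Python) =====
-- def __create_probabilities_dict(information):
--     counts = {}
--     for s in information:
--         counts[s] = counts.get(s, 0) + 1
--     buckets = {}
--     for sym, c in counts.items():
--         buckets.setdefault(c, []).append(sym)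
--     maxc = max(buckets, default=0)
--     result = {}
--     for c in range(maxc, 0, -1):
--         for sym in buckets.get(c, []):
--             result[sym] = c
--     return result
-- ===== Notes on version B (the rewrite author's own statement) =====
-- stated objective: alternative
-- what changed: Replaces the stable comparison sort of (symbol,count) items by a counting sort: counts go into frequency buckets (insertion order preserved) which are emitted from the maximal count down to 1.
import Mathlib
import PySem

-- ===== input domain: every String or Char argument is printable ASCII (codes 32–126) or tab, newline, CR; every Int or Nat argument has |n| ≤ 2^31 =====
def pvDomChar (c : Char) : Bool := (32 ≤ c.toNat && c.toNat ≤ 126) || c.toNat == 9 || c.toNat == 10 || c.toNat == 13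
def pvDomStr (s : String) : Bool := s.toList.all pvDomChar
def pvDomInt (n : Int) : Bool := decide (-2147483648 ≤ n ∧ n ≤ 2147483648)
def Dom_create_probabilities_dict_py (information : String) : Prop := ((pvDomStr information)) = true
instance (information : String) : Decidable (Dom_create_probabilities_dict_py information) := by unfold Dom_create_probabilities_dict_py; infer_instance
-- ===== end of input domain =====

-- B replaces A's stable comparison sort of the count dict by a counting sort over
-- frequency buckets emitted from the maximal count down to 1 (objective: alternative).

-- ===== PORT A =====
def create_probabilities_dict_py (information : String) : List (String × Int) :=
  -- d = {}; for s in information: if not d.__contains__(s): d[s] = 1 else: d[s] += 1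
  let d : PySem.Dict String Int :=
    (information.toList.map (fun c => String.mk [c])).foldl
      (fun d s =>
        if d.contains s == false then d.insert s 1
        else d.insert s (d.getD s 0 + 1))
      PySem.Dict.empty
  -- dict(sorted(d.items(), reverse=True, key=itemgetter(1)))
  (PySem.Dict.ofList (PySem.List.sorted d.items (fun p => p.2) true)).items

-- ===== PORT B =====
def create_probabilities_dict_py_alt (information : String) : List (String × Int) :=
  -- counts[s] = counts.get(s, 0) + 1
  let counts : PySem.Dict String Int :=
    (information.toList.map (fun c => String.mk [c])).foldl
      (fun d s => d.insert s (d.getD s 0 + 1))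
      PySem.Dict.empty
  -- buckets.setdefault(c, []).append(sym)  (mutates the bucket list in place:
  -- exactly buckets[c] = buckets.get(c, []) + [sym], i.e. Dict.modify)
  let buckets : PySem.Dict Int (List String) :=
    counts.items.foldl (fun b p => b.modify p.2 [] (fun l => l ++ [p.1])) PySem.Dict.empty
  -- maxc = max(buckets, default=0)
  let maxc : Int := (PySem.List.max? buckets.keys (fun v => v)).getD 0
  -- for c in range(maxc, 0, -1): for sym in buckets.get(c, []): result[sym] = c
  let result : PySem.Dict String Int :=
    (PySem.List.pyRange maxc 0 (-1)).foldl
      (fun r c => (buckets.getD c []).foldl (fun r sym => r.insert sym c) r)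
      PySem.Dict.empty
  result.items

-- ===== PRECONDITION & SPEC =====
def Spec_create_probabilities_dict_py (information : String) (out : List (String × Int)) : Prop := out = create_probabilities_dict_py_alt information
instance (information : String) (out : List (String × Int)) : Decidable (Spec_create_probabilities_dict_py information out) := by unfold Spec_create_probabilities_dict_py; infer_instance

-- ===== CLAIM (what is proved, stated in full; the proofs are below) =====
def Claim_equal_create_probabilities_dict_py : Prop := ∀ (information : String), Dom_create_probabilities_dict_py information → Spec_create_probabilities_dict_py information (create_probabilities_dict_py information)

-- ===== LEMMAS AND PROOFS =====

-- A's counting loop body is Dict.modify (Counter's step).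
theorem countA_step (d : PySem.Dict String Int) (s : String) :
    (if d.contains s == false then d.insert s 1 else d.insert s (d.getD s 0 + 1))
      = d.modify s 0 (· + 1) := by
  by_cases h : d.contains s = true
  · simp [h, PySem.Dict.modify]
  · have hnone : d.get? s = none := by
      have := PySem.Dict.contains_eq_isSome_get? d s
      cases hg : d.get? s with
      | none => rfl
      | some v => rw [hg] at this; simp [this] at h
    simp [h, PySem.Dict.modify, PySem.Dict.getD, hnone]

theorem countA_eq (syms : List String) :
    syms.foldl
      (fun d s =>
        if d.contains s == false then d.insert s 1 else d.insert s (d.getD s 0 + 1))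
      PySem.Dict.empty = PySem.Dict.counter syms := by
  have h : (fun (d : PySem.Dict String Int) s =>
      if d.contains s == false then d.insert s 1 else d.insert s (d.getD s 0 + 1))
      = fun d s => d.modify s 0 (· + 1) := by
    funext d s; exact countA_step d s
  rw [h]; rfl

-- insertBy walks past a block it does not go before
theorem insertBy_skip {α : Type} (before : α → α → Bool) (x : α) (ys zs : List α)
    (h : ∀ y ∈ ys, before x y = false) :
    PySem.List.insertBy before x (ys ++ zs) = ys ++ PySem.List.insertBy before x zs := by
  induction ys with
  | nil => rfl
  | cons y ys ih =>
      have hy : before x y = false := h y (by simp)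
      simp [PySem.List.insertBy, hy]
      exact ih (fun y hy' => h y (by simp [hy']))

theorem insertBy_front {α : Type} (before : α → α → Bool) (x : α) (zs : List α)
    (h : ∀ y ∈ zs, before x y = true) :
    PySem.List.insertBy before x zs = x :: zs := by
  cases zs with
  | nil => rfl
  | cons z zs => simp [PySem.List.insertBy, h z (by simp)]

theorem flatMap_congr_mem {α β : Type} (vs : List α) (f g : α → List β)
    (h : ∀ v ∈ vs, f v = g v) : vs.flatMap f = vs.flatMap g := by
  induction vs with
  | nil => rfl
  | cons v vs ih =>
      simp only [List.flatMap_cons]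
      rw [h v (by simp), ih (fun v hv => h v (by simp [hv]))]

-- inserting x into a bucket-concatenation appends x to its own bucket
theorem insertBy_flatMap (x : String × Int) (vs : List Int) (f : Int → List (String × Int))
    (hvs : vs.Pairwise (· > ·)) (hx : x.2 ∈ vs)
    (hf : ∀ v ∈ vs, ∀ p ∈ f v, p.2 = v) :
    PySem.List.insertBy (fun a b => decide (b.2 < a.2)) x (vs.flatMap f)
      = vs.flatMap (fun v => if v = x.2 then f v ++ [x] else f v) := by
  induction vs with
  | nil => simp at hx
  | cons v vs ih =>
      rw [List.pairwise_cons] at hvs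
      simp only [List.flatMap_cons]
      have hskip : ∀ y ∈ f v, (fun a b => decide (b.2 < a.2)) x y = false := by
        intro y hy
        have hyv : y.2 = v := hf v (by simp) y hy
        by_cases hvx : v = x.2
        · simp [hyv, hvx]
        · have hxv : x.2 ∈ vs := by
            rcases List.mem_cons.mp hx with h | h
            · exact absurd h.symm hvx
            · exact h
          have : x.2 < v := hvs.1 _ hxv
          simp [hyv]; omega
      rw [insertBy_skip _ _ _ _ hskip]
      by_cases hvx : v = x.2
      · have hfront : ∀ y ∈ vs.flatMap f, (fun a b => decide (b.2 < a.2)) x y = true := by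
          intro y hy
          rcases List.mem_flatMap.mp hy with ⟨w, hw, hyw⟩
          have : y.2 = w := hf w (by simp [hw]) y hyw
          have : y.2 < v := by rw [this]; exact hvs.1 _ hw
          simp; omega
        rw [insertBy_front _ _ _ hfront, if_pos hvx]
        have : vs.flatMap (fun w => if w = x.2 then f w ++ [x] else f w) = vs.flatMap f := by
          apply flatMap_congr_mem
          intro w hw
          have : w < v := hvs.1 _ hw
          rw [if_neg (by omega)]
        rw [this]; simp
      · have hx' : x.2 ∈ vs := by
          rcases List.mem_cons.mp hx with h | h
          · exact absurd h.symm hvx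
          · exact h
        rw [ih hvs.2 hx' (fun w hw => hf w (by simp [hw])), if_neg hvx]

-- the stable reverse sort by value is the bucket concatenation over any strictly
-- descending value list covering all values
theorem sorted_buckets (L : List (String × Int)) (vs : List Int)
    (hvs : vs.Pairwise (· > ·)) (hall : ∀ p ∈ L, p.2 ∈ vs) :
    PySem.List.sorted L (fun p => p.2) true
      = vs.flatMap (fun v => L.filter (fun p => p.2 == v)) := by
  induction L using List.reverseRecOn with
  | nil => simp [PySem.List.sorted]
  | append_singleton M x ih =>
      rw [PySem.List.sorted_rev_eq_foldl_insertBy, List.foldl_append]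
      simp only [List.foldl_cons, List.foldl_nil]
      rw [← PySem.List.sorted_rev_eq_foldl_insertBy,
        ih (fun p hp => hall p (by simp [hp]))]
      rw [insertBy_flatMap x vs _ hvs (hall x (by simp))
        (fun v _ p hp => by simpa using (List.of_mem_filter hp))]
      apply flatMap_congr_mem
      intro v _
      rw [List.filter_append]
      by_cases hvx : v = x.2
      · simp [hvx]
      · have : (x.2 == v) = false := by simp; omega
        simp [if_neg hvx, this]

theorem max?_spec (xs : List Int) (a : Int) :
    ∃ m, PySem.List.max? (a :: xs) (fun v => v) = some m ∧
      (m = a ∨ m ∈ xs) ∧ a ≤ m ∧ ∀ x ∈ xs, x ≤ m := by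
  induction xs generalizing a with
  | nil => exact ⟨a, by simp [PySem.List.max?], Or.inl rfl, le_refl _, by simp⟩
  | cons x l ih =>
      have hstep : PySem.List.max? (a :: x :: l) (fun v => v)
          = PySem.List.max? ((if a < x then x else a) :: l) (fun v => v) := by
        by_cases hax : a < x <;> simp [PySem.List.max?, hax]
      by_cases hax : a < x
      · rcases ih x with ⟨m, hm, hmem, hle, hall⟩
        refine ⟨m, by rw [hstep, if_pos hax]; exact hm, ?_, by omega, ?_⟩
        · rcases hmem with h | h
          · exact Or.inr (by simp [h])
          · exact Or.inr (by simp [h])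
        · intro y hy
          rcases List.mem_cons.mp hy with h | h
          · omega
          · exact hall y h
      · rcases ih a with ⟨m, hm, hmem, hle, hall⟩
        refine ⟨m, by rw [hstep, if_neg hax]; exact hm, ?_, hle, ?_⟩
        · rcases hmem with h | h
          · exact Or.inl h
          · exact Or.inr (by simp [h])
        · intro y hy
          rcases List.mem_cons.mp hy with h | h
          · omega
          · exact hall y h

theorem le_max?_getD (xs : List Int) (x : Int) (hx : x ∈ xs) :
    x ≤ (PySem.List.max? xs (fun v => v)).getD 0 := by
  cases xs with
  | nil => simp at hx
  | cons a l =>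
      rcases max?_spec l a with ⟨m, hm, _, hle, hall⟩
      rw [hm]
      rcases List.mem_cons.mp hx with h | h
      · simp [h]; omega
      · simpa using hall x h

theorem max?_getD_mem (xs : List Int) (hne : xs ≠ []) :
    (PySem.List.max? xs (fun v => v)).getD 0 ∈ xs := by
  cases xs with
  | nil => exact absurd rfl hne
  | cons a l =>
      rcases max?_spec l a with ⟨m, hm, hmem, _, _⟩
      rw [hm]
      rcases hmem with h | h
      · simp [h]
      · simp [h]

-- range(m, 0, -1) as a map over List.range
theorem pyRange_down (m : Int) (hm : 0 ≤ m) :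
    PySem.List.pyRange m 0 (-1) = (List.range m.toNat).map (fun k : Nat => m - (k : Int)) := by
  unfold PySem.List.pyRange
  rw [if_neg (by norm_num : ¬ ((-1:Int) = 0))]
  rw [if_neg (by norm_num : ¬ ((0:Int) < -1))]
  by_cases h : (0:Int) < m
  · rw [if_pos h]
    have h2 : (m - 0 + -(-1) - 1) / -(-1) = m := by norm_num
    rw [h2]
    apply List.map_congr_left
    intro k _
    omega
  · rw [if_neg h]
    have : m.toNat = 0 := by omega
    simp [this]

theorem mem_pyRange_down (m c : Int) (hm : 0 ≤ m) :
    c ∈ PySem.List.pyRange m 0 (-1) ↔ 1 ≤ c ∧ c ≤ m := by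
  rw [pyRange_down m hm]
  simp only [List.mem_map, List.mem_range]
  constructor
  · rintro ⟨k, hk, rfl⟩
    omega
  · intro ⟨h1, h2⟩
    exact ⟨(m - c).toNat, by omega, by omega⟩

theorem pairwise_pyRange_down (m : Int) (hm : 0 ≤ m) :
    (PySem.List.pyRange m 0 (-1)).Pairwise (· > ·) := by
  rw [pyRange_down m hm]
  refine List.Pairwise.map _ ?_ List.pairwise_lt_range
  intro a b hab
  simp only [gt_iff_lt]
  omega

-- the bucket dict built from L maps c to the symbols of value c, in order
theorem buckets_getD (L : List (String × Int)) (c : Int) :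
    (L.foldl (fun b p => b.modify p.2 [] (fun l => l ++ [p.1])) PySem.Dict.empty).getD c []
      = (L.filter (fun p => p.2 == c)).map Prod.fst := by
  induction L using List.reverseRecOn with
  | nil => rfl
  | append_singleton M x ih =>
      rw [List.foldl_append]
      simp only [List.foldl_cons, List.foldl_nil]
      rw [show (M.foldl (fun b p => b.modify p.2 [] (fun l => l ++ [p.1]))
            PySem.Dict.empty).modify x.2 [] (fun l => l ++ [x.1])
          = (M.foldl (fun b p => b.modify p.2 [] (fun l => l ++ [p.1]))
            PySem.Dict.empty).insert x.2
            ((M.foldl (fun b p => b.modify p.2 [] (fun l => l ++ [p.1]))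
              PySem.Dict.empty).getD x.2 [] ++ [x.1]) from rfl,
        PySem.Dict.getD_insert]
      by_cases hc : c = x.2
      · rw [if_pos hc, List.filter_append, List.map_append, ← hc, ih]
        simp [hc]
      · rw [if_neg hc, List.filter_append, List.map_append, ih]
        have : (x.2 == c) = false := by simp; omega
        simp [this]

-- nested per-bucket insertion with pair keys
theorem nested_insert (vs : List Int) (g : Int → List String) (r : PySem.Dict String Int) :
    vs.foldl (fun r c => (g c).foldl (fun r sym => r.insert sym c) r) r
      = (vs.flatMap (fun c => (g c).map (fun s => (s, c)))).foldl
          (fun r p => r.insert p.1 p.2) r := by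
  induction vs generalizing r with
  | nil => rfl
  | cons c vs ih =>
      simp only [List.foldl_cons, List.flatMap_cons, List.foldl_append, List.foldl_map]
      exact ih _

theorem central (L : List (String × Int)) (hpos : ∀ p ∈ L, 1 ≤ p.2) :
    (PySem.Dict.ofList (PySem.List.sorted L (fun p => p.2) true)).items
      = ((PySem.List.pyRange
            ((PySem.List.max?
              (L.foldl (fun b p => b.modify p.2 [] (fun l => l ++ [p.1]))
                PySem.Dict.empty).keys (fun v => v)).getD 0) 0 (-1)).foldl
          (fun r c =>
            ((L.foldl (fun b p => b.modify p.2 [] (fun l => l ++ [p.1]))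
                PySem.Dict.empty).getD c []).foldl (fun r sym => r.insert sym c) r)
          PySem.Dict.empty).items := by
  have hkeys : (L.foldl (fun b p => b.modify p.2 [] (fun l => l ++ [p.1]))
      PySem.Dict.empty).keys = PySem.Set.ofList (L.map Prod.snd) := by
    rw [PySem.Dict.keys_foldl_modify_key L Prod.snd ([] : List String)
      (fun _ p => fun l => l ++ [p.1]) PySem.Dict.empty]
    rw [show (PySem.Dict.empty : PySem.Dict Int (List String)).keys = [] from rfl,
      PySem.Set.update_nil_left]
  set maxc := (PySem.List.max?
      (L.foldl (fun b p => b.modify p.2 [] (fun l => l ++ [p.1]))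
        PySem.Dict.empty).keys (fun v => v)).getD 0 with hmaxc
  have hmax0 : 0 ≤ maxc := by
    by_cases h : (L.foldl (fun b p => b.modify p.2 [] (fun l => l ++ [p.1]))
        PySem.Dict.empty).keys = []
    · rw [hmaxc, h]; simp [PySem.List.max?]
    · have hmem := max?_getD_mem _ h
      rw [← hmaxc] at hmem
      rw [hkeys, PySem.Set.mem_ofList] at hmem
      rcases List.mem_map.mp hmem with ⟨p, hp, hpe⟩
      have := hpos p hp
      omega
  have hle : ∀ p ∈ L, p.2 ≤ maxc := by
    intro p hp
    apply le_max?_getD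
    rw [hkeys, PySem.Set.mem_ofList]
    exact List.mem_map_of_mem hp
  have hall : ∀ p ∈ L, p.2 ∈ PySem.List.pyRange maxc 0 (-1) := by
    intro p hp
    exact (mem_pyRange_down maxc p.2 hmax0).mpr ⟨hpos p hp, hle p hp⟩
  have hsorted := sorted_buckets L (PySem.List.pyRange maxc 0 (-1))
    (pairwise_pyRange_down maxc hmax0) hall
  rw [hsorted]
  rw [nested_insert]
  simp only [buckets_getD]
  have hg : ∀ c : Int, ((L.filter (fun p => p.2 == c)).map Prod.fst).map (fun s => (s, c))
      = L.filter (fun p => p.2 == c) := by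
    intro c
    rw [List.map_map]
    conv_rhs => rw [← List.map_id (L.filter (fun p => p.2 == c))]
    apply List.map_congr_left
    intro p hp
    have h3 : p.2 = c := by simpa using (List.mem_filter.mp hp).2
    simp [← h3]
  simp only [hg]
  rfl

theorem countB_eq (syms : List String) :
    syms.foldl (fun d s => d.insert s (d.getD s 0 + 1)) PySem.Dict.empty
      = PySem.Dict.counter syms := rfl

theorem counter_items_pos (syms : List String) :
    ∀ p ∈ (PySem.Dict.counter syms).items, (1 : Int) ≤ p.2 := by
  intro p hp
  rw [PySem.Dict.items_counter] at hp
  rcases List.mem_map.mp hp with ⟨k, hk, rfl⟩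
  have hk' : k ∈ syms := (PySem.Set.mem_ofList syms k).mp hk
  have hc : 0 < syms.count k := List.count_pos_iff.mpr hk'
  simp only
  exact_mod_cast hc

-- ===== VERDICT (by name: the statement is the Claim_ definition above) =====
theorem create_probabilities_dict_py_spec : Claim_equal_create_probabilities_dict_py := by
  intro information _
  show create_probabilities_dict_py information = create_probabilities_dict_py_alt information
  simp only [create_probabilities_dict_py, create_probabilities_dict_py_alt]
  rw [countA_eq, countB_eq]
  exact central _ (counter_items_pos _)
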